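-- pv_equiv track=rewrite | github.com/anu-coder/Intensive-python | exercises/num_consec.py | consecutive_spells
-- ===== SOURCE A (Python) =====
-- def consecutive_spells(lst, n):
--     '''Returns the number of such spells, and total spell length
--     with consecutive 1's with spell length atleast n.
--
--
--     >>> consecutive_spells([1,1,1,0,0,1,1,0,1,1,1,1,1,0,1,1], n=3)
--     >>> {'num_spells': 2, 'spell_length': 8}
--     '''
--     cur_count = 0
--     num_spells = 0
--     spell_length = 0
--
--     for i in lst:
--         if i == 1:
--             cur_count += 1
--         else:
--             if cur_count >= n:
--                 num_spells += 1
--                 spell_length += cur_count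
--
--             cur_count = 0
--
--
--     res = {'num_spells': num_spells, 'spell_length': spell_length}
--
--
--
--     return(res)
-- ===== SOURCE B (Python) =====
-- def consecutive_spells(lst, n):
--     delims = [i for i, x in enumerate(lst) if x != 1]
--     num_spells = 0
--     spell_length = 0
--     prev = -1
--     for d in delims:
--         run = d - prev - 1
--         if run >= n:
--             num_spells += 1
--             spell_length += run
--         prev = d
--     return {'num_spells': num_spells, 'spell_length': spell_length}
-- ===== Notes on version B (the rewrite author's own statement) =====
-- stated objective: alternative
-- what changed: B replaces A's per-element run counter with a delimiter-index pass: it first collects the positions of non-1 elements, then computes each completed run length as the gap between successive delimiters.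
import Mathlib
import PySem

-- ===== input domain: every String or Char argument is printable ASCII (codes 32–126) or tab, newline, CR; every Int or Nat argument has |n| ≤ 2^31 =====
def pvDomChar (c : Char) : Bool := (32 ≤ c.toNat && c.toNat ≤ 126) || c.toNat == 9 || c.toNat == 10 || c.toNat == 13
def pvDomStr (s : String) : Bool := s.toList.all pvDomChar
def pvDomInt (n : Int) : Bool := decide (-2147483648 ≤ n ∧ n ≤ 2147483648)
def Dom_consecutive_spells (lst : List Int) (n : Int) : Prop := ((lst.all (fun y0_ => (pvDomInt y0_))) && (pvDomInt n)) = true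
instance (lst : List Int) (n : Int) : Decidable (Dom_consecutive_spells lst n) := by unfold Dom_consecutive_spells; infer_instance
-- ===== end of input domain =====

-- B computes the same result via delimiter positions and gap lengths instead of a running counter (alternative decomposition, same cost).


-- ===== PORT A =====
-- A's loop: state (cur_count, num_spells, spell_length)
def csLoopA : List Int → Int → Int → Int → Int → Int × Int
  | [], _, _cur, num, len => (num, len)
  | x :: xs, n, cur, num, len =>
    if x = 1 then csLoopA xs n (cur + 1) num len
    else if cur ≥ n then csLoopA xs n 0 (num + 1) (len + cur)
    else csLoopA xs n 0 num len

def consecutive_spells (lst : List Int) (n : Int) : List (String × Int) :=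
  let r := csLoopA lst n 0 0 0
  [("num_spells", r.1), ("spell_length", r.2)]

-- ===== PORT B =====
-- B: delimiter positions (indices of non-1 elements), then gaps between them
def csDelims : List Int → Int → List Int
  | [], _ => []
  | x :: xs, i => if x ≠ 1 then i :: csDelims xs (i + 1) else csDelims xs (i + 1)

-- B's loop over the delimiter indices: state (prev, num_spells, spell_length)
def csLoopB : List Int → Int → Int → Int → Int → Int × Int
  | [], _, _prev, num, len => (num, len)
  | d :: ds, n, prev, num, len =>
    let run := d - prev - 1
    if run ≥ n then csLoopB ds n d (num + 1) (len + run)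
    else csLoopB ds n d num len

def consecutive_spells_alt (lst : List Int) (n : Int) : List (String × Int) :=
  let r := csLoopB (csDelims lst 0) n (-1) 0 0
  [("num_spells", r.1), ("spell_length", r.2)]

-- ===== PRECONDITION & SPEC =====
def Spec_consecutive_spells (lst : List Int) (n : Int) (out : List (String × Int)) : Prop := out = consecutive_spells_alt lst n
instance (lst : List Int) (n : Int) (out : List (String × Int)) : Decidable (Spec_consecutive_spells lst n out) := by unfold Spec_consecutive_spells; infer_instance

-- ===== CLAIM (what is proved, stated in full; the proofs are below) =====
def Claim_equal_consecutive_spells : Prop := ∀ (lst : List Int) (n : Int), Dom_consecutive_spells lst n → Spec_consecutive_spells lst n (consecutive_spells lst n)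

-- ===== LEMMAS AND PROOFS =====

-- ===== VERDICT (by name: the statement is the Claim_ definition above) =====
theorem csLoop_key (lst : List Int) : ∀ (n i prev num len : Int),
    csLoopB (csDelims lst i) n prev num len = csLoopA lst n (i - prev - 1) num len := by
  induction lst with
  | nil => intro n i prev num len; simp [csDelims, csLoopB, csLoopA]
  | cons x xs ih =>
    intro n i prev num len
    by_cases hx : x = 1
    · simp only [csDelims, csLoopA, hx, if_pos, ne_eq, not_true_eq_false, if_false]
      rw [ih]
      have h : i + 1 - prev - 1 = i - prev - 1 + 1 := by ring
      rw [h]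
    · simp only [csDelims, csLoopA, hx, ne_eq, not_false_eq_true, if_true, if_false]
      rw [csLoopB]
      have h0 : i + 1 - i - 1 = 0 := by ring
      by_cases hc : i - prev - 1 ≥ n
      · simp only [hc, if_pos]
        rw [ih, h0]
      · simp only [hc, ite_false]
        rw [ih, h0]

theorem consecutive_spells_spec : Claim_equal_consecutive_spells := by
  intro lst n _
  unfold Spec_consecutive_spells consecutive_spells consecutive_spells_alt
  rw [csLoop_key]
  norm_num
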